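-- pv_equiv track=rewrite | github.com/xuxin2023/gas_calibrator | src/gas_calibrator/workflow/co2_calibration_candidate_pack.py | _group_reason_summary
-- ===== SOURCE A (Python) =====
-- from collections import Counter
-- from typing import Any, Dict, Iterable, List, Mapping, Optional, Sequence, Tuple
--
-- def _as_text(value: Any) -> str:
--     return str(value or "").strip()
--
-- def _group_reason_summary(rows: Sequence[Mapping[str, Any]]) -> str:
--     counter: Counter[str] = Counter()
--     for row in rows:
--         for token in _as_text(row.get("co2_calibration_weight_reason")).split(";"):
--             token = token.strip()
--             if token:
--                 counter[token] += 1
--     if not counter: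
--         return ""
--     top = [f"{key}:{count}" for key, count in counter.most_common(3)]
--     return ";".join(top)
-- ===== SOURCE B (Python) =====
-- def _group_reason_summary(rows):
--     counts = {}
--     for row in rows:
--         text = str(row.get("co2_calibration_weight_reason") or "").strip()
--         for raw in text.split(";"):
--             token = raw.strip()
--             if token:
--                 counts[token] = counts.get(token, 0) + 1
--     items = list(counts.items())
--     parts = []
--     while items and len(parts) < 3:
--         best = max(items, key=lambda kv: kv[1])
--         items.remove(best)
--         parts.append(f"{best[0]}:{best[1]}")
--     return ";".join(parts)
-- ===== Notes on version B (the rewrite author's own statement) =====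
-- stated objective: alternative
-- what changed: B counts into a plain dict instead of a Counter and replaces most_common(3) (a sort/partial-selection of all items) by at most three explicit rounds of max()+remove() first-maximum extraction, with no sort and no empty-check special case.
import Mathlib
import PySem

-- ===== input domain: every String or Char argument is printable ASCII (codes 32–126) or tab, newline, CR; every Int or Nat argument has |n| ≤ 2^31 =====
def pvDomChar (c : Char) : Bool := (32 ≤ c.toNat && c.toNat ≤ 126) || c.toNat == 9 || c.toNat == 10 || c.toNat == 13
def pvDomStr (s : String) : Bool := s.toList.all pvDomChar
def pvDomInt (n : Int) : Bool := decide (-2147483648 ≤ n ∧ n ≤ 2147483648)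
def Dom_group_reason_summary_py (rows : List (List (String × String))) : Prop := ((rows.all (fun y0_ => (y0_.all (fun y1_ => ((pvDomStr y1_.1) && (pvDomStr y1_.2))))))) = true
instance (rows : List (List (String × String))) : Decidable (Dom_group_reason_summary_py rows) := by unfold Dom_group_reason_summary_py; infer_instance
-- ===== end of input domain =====

-- B replaces Counter + most_common(3) by a plain dict and three rounds of first-max
-- extraction (max + remove), i.e. partial selection without sorting (objective: alternative).
-- ===== PORT A =====
-- _as_text(value) = str(value or "").strip(); for an Optional[str] argument this is strip of the string, "" for None
def pvAsText (value : Option String) : String := PySem.Str.strip (value.getD "")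

def group_reason_summary_py (rows : List (List (String × String))) : String :=
  -- counter = Counter(); nested loop over rows and over the ';'-split of the reason text
  let counter : PySem.Dict String Int :=
    rows.foldl (fun counter row =>
      ((PySem.Str.split? (pvAsText ((PySem.Dict.ofList row).get? "co2_calibration_weight_reason")) ";").getD []).foldl
        (fun counter tok =>
          let token := PySem.Str.strip tok
          if token ≠ "" then counter.modify token 0 (· + 1) else counter)
        counter)
      PySem.Dict.empty
  if counter.size = 0 then ""
  else
    -- counter.most_common(3) = sorted(counter.items(), key=item[1], reverse=True)[:3] (documented semantics of most_common/nlargest)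
    let top := ((PySem.List.sorted counter.items (fun kv => kv.2) true).take 3).map
      (fun kv => kv.1 ++ ":" ++ PySem.Int.toStr kv.2)
    PySem.Str.join ";" top

-- ===== PORT B =====
-- the 'while items and len(parts) < 3' loop: at most 3 rounds, each taking the first max and removing it
def pvRounds : Nat → List (String × Int) → List String
  | 0, _ => []
  | Nat.succ k, items =>
    match PySem.List.max? items (fun kv => kv.2) with
    | none => []  -- items exhausted
    | some best =>
      match PySem.List.remove? items best with
      | none => []  -- unreachable: best ∈ items (totality guard)
      | some rest => (best.1 ++ ":" ++ PySem.Int.toStr best.2) :: pvRounds k rest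

def group_reason_summary_py_alt (rows : List (List (String × String))) : String :=
  let counts : PySem.Dict String Int :=
    rows.foldl (fun counts row =>
      ((PySem.Str.split? (PySem.Str.strip (((PySem.Dict.ofList row).get? "co2_calibration_weight_reason").getD "")) ";").getD []).foldl
        (fun counts raw =>
          let token := PySem.Str.strip raw
          if token ≠ "" then counts.insert token (counts.getD token 0 + 1) else counts)
        counts)
      PySem.Dict.empty
  PySem.Str.join ";" (pvRounds 3 counts.items)

-- ===== PRECONDITION & SPEC =====
def Spec_group_reason_summary_py (rows : List (List (String × String))) (out : String) : Prop := out = group_reason_summary_py_alt rows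
instance (rows : List (List (String × String))) (out : String) : Decidable (Spec_group_reason_summary_py rows out) := by unfold Spec_group_reason_summary_py; infer_instance

-- ===== CLAIM (what is proved, stated in full; the proofs are below) =====
def Claim_equal_group_reason_summary_py : Prop := ∀ (rows : List (List (String × String))), Dom_group_reason_summary_py rows → Spec_group_reason_summary_py rows (group_reason_summary_py rows)

-- ===== LEMMAS AND PROOFS =====

-- inserting an element whose key beats everything in t goes to the front
lemma pv_insertBy_front (m : String × Int) (t : List (String × Int))
    (h : ∀ y ∈ t, y.2 < m.2) :
    PySem.List.insertBy (fun a b : String × Int => decide (b.2 < a.2)) m t = m :: t := by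
  cases t with
  | nil => simp [PySem.List.insertBy]
  | cons y ys =>
    have := h y (by simp)
    simp [PySem.List.insertBy, this]

-- stable descending insertion sort extracts the first maximum first
lemma pv_sorted_rev_firstmax (m : String × Int) :
    ∀ (r l : List (String × Int)),
    (∀ y ∈ l, y.2 < m.2) → (∀ y ∈ r, y.2 ≤ m.2) →
    PySem.List.sorted (l ++ m :: r) (fun kv => kv.2) true
      = m :: PySem.List.sorted (l ++ r) (fun kv => kv.2) true := by
  intro r
  induction r using List.reverseRecOn with
  | nil =>
    intro l hl _
    rw [PySem.List.sorted_rev_eq_foldl_insertBy, PySem.List.sorted_rev_eq_foldl_insertBy]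
    rw [List.foldl_append]
    simp only [List.foldl_cons, List.foldl_nil, List.append_nil]
    rw [show (List.foldl (fun acc x => PySem.List.insertBy (fun a b => decide ((fun kv : String × Int => kv.2) b < (fun kv : String × Int => kv.2) a)) x acc) [] l)
        = PySem.List.sorted l (fun kv => kv.2) true from (PySem.List.sorted_rev_eq_foldl_insertBy l _).symm]
    exact pv_insertBy_front m _ (fun y hy => hl y ((PySem.List.mem_sorted _ _ _ _).1 hy))
  | append_singleton r' x ih =>
    intro l hl hr
    have hx : x.2 ≤ m.2 := hr x (by simp)
    have hr' : ∀ y ∈ r', y.2 ≤ m.2 := fun y hy => hr y (by simp [hy])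
    have e1 : l ++ m :: (r' ++ [x]) = (l ++ m :: r') ++ [x] := by simp
    have e2 : l ++ (r' ++ [x]) = (l ++ r') ++ [x] := by simp
    rw [e1, e2]
    rw [PySem.List.sorted_rev_eq_foldl_insertBy, List.foldl_append]
    rw [show (List.foldl (fun acc x => PySem.List.insertBy (fun a b => decide ((fun kv : String × Int => kv.2) b < (fun kv : String × Int => kv.2) a)) x acc) [] (l ++ m :: r'))
        = PySem.List.sorted (l ++ m :: r') (fun kv => kv.2) true from (PySem.List.sorted_rev_eq_foldl_insertBy _ _).symm]
    rw [ih l hl hr']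
    rw [PySem.List.sorted_rev_eq_foldl_insertBy (l ++ r') (fun kv => kv.2),
        PySem.List.sorted_rev_eq_foldl_insertBy ((l ++ r') ++ [x]) (fun kv => kv.2)]
    rw [List.foldl_append]
    simp only [List.foldl_cons, List.foldl_nil]
    have hbef : (decide (m.2 < x.2)) = false := by simp; omega
    simp [PySem.List.insertBy, hbef]

-- max? over xs ++ [x]: the accumulator step, split into its three cases
lemma pv_max?_append_none (xs : List (String × Int)) (x : String × Int)
    (h : PySem.List.max? xs (fun kv => kv.2) = none) :
    PySem.List.max? (xs ++ [x]) (fun kv => kv.2) = some x := by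
  simp only [PySem.List.max?] at h ⊢
  rw [List.foldl_append, List.foldl_cons, List.foldl_nil, h]

lemma pv_max?_append_lt (xs : List (String × Int)) (x m0 : String × Int)
    (h : PySem.List.max? xs (fun kv => kv.2) = some m0) (hlt : m0.2 < x.2) :
    PySem.List.max? (xs ++ [x]) (fun kv => kv.2) = some x := by
  simp only [PySem.List.max?] at h ⊢
  rw [List.foldl_append, List.foldl_cons, List.foldl_nil, h]
  simp [hlt]

lemma pv_max?_append_ge (xs : List (String × Int)) (x m0 : String × Int)
    (h : PySem.List.max? xs (fun kv => kv.2) = some m0) (hge : ¬ m0.2 < x.2) :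
    PySem.List.max? (xs ++ [x]) (fun kv => kv.2) = some m0 := by
  simp only [PySem.List.max?] at h ⊢
  rw [List.foldl_append, List.foldl_cons, List.foldl_nil, h]
  simp [hge]

-- max? returns the first maximum: it splits the list into strictly-smaller prefix / no-larger suffix
lemma pv_max?_decomp (xs : List (String × Int)) (m : String × Int)
    (h : PySem.List.max? xs (fun kv => kv.2) = some m) :
    ∃ l r, xs = l ++ m :: r ∧ (∀ y ∈ l, y.2 < m.2) ∧ (∀ y ∈ r, y.2 ≤ m.2) := by
  induction xs using List.reverseRecOn generalizing m with
  | nil => simp [PySem.List.max?] at h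
  | append_singleton xs x ih =>
    cases hmx : PySem.List.max? xs (fun kv : String × Int => kv.2) with
    | none =>
      have hnil : xs = [] := (PySem.List.max?_eq_none_iff _ _).1 hmx
      rw [pv_max?_append_none xs x hmx] at h
      obtain rfl : x = m := by simpa using h
      exact ⟨[], [], by simp [hnil], by simp, by simp⟩
    | some m0 =>
      obtain ⟨l, r, hx, hl, hr⟩ := ih m0 hmx
      by_cases hlt : m0.2 < x.2
      · rw [pv_max?_append_lt xs x m0 hmx hlt] at h
        obtain rfl : x = m := by simpa using h
        refine ⟨xs, [], by simp, ?_, by simp⟩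
        intro y hy
        rw [hx] at hy
        rcases List.mem_append.1 hy with hy | hy
        · exact lt_trans (hl y hy) hlt
        · rcases List.mem_cons.1 hy with rfl | hy
          · exact hlt
          · exact lt_of_le_of_lt (hr y hy) hlt
      · rw [pv_max?_append_ge xs x m0 hmx hlt] at h
        obtain rfl : m0 = m := by simpa using h
        exact ⟨l, r ++ [x], by simp [hx], hl, by
          intro y hy
          rcases List.mem_append.1 hy with hy | hy
          · exact hr y hy
          · simp at hy; subst hy; omega⟩

-- the extraction loop computes map-format of the first k elements of the stable descending sort
lemma pv_rounds_eq (k : Nat) : ∀ (items : List (String × Int)),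
    pvRounds k items
      = ((PySem.List.sorted items (fun kv => kv.2) true).take k).map
          (fun kv => kv.1 ++ ":" ++ PySem.Int.toStr kv.2) := by
  induction k with
  | zero => intro items; simp [pvRounds]
  | succ k ih =>
    intro items
    cases hmx : PySem.List.max? items (fun kv => kv.2) with
    | none =>
      have : items = [] := (PySem.List.max?_eq_none_iff _ _).1 hmx
      subst this
      simp [pvRounds, hmx, PySem.List.sorted]
    | some best =>
      obtain ⟨l, r, hx, hl, hr⟩ := pv_max?_decomp items best hmx
      have hnotl : best ∉ l := fun hb => lt_irrefl _ (hl best hb)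
      have hmem : best ∈ items := by rw [hx]; simp
      have hrem : PySem.List.remove? items best = some (l ++ r) := by
        rw [PySem.List.remove?_eq_some_erase _ _ hmem, hx,
            List.erase_append_right _ hnotl, List.erase_cons_head]
      have hsort : PySem.List.sorted items (fun kv => kv.2) true
          = best :: PySem.List.sorted (l ++ r) (fun kv => kv.2) true := by
        rw [hx]; exact pv_sorted_rev_firstmax best r l hl hr
      simp only [pvRounds, hmx, hrem, hsort, List.take_succ_cons, List.map_cons]
      rw [ih (l ++ r)]

-- the top-3-of-sort tail of A equals the three extraction rounds of B, for any counts dict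
lemma pv_final (c : PySem.Dict String Int) :
    (if c.size = 0 then ""
     else PySem.Str.join ";" (((PySem.List.sorted c.items (fun kv => kv.2) true).take 3).map
       (fun kv => kv.1 ++ ":" ++ PySem.Int.toStr kv.2)))
    = PySem.Str.join ";" (pvRounds 3 c.items) := by
  by_cases h : c.items = []
  · have hsz : c.size = 0 := by simp [PySem.Dict.size, h]
    simp [hsz, h, pvRounds, PySem.List.max?, PySem.Str.join]
  · have hsz : c.size ≠ 0 := by simp [PySem.Dict.size, h]
    simp only [hsz, if_false]
    rw [pv_rounds_eq 3 c.items]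

-- ===== VERDICT (by name: the statement is the Claim_ definition above) =====
theorem group_reason_summary_py_spec : Claim_equal_group_reason_summary_py := by
  intro rows _
  unfold Spec_group_reason_summary_py group_reason_summary_py group_reason_summary_py_alt
  exact pv_final _
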